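-- pv_equiv track=rewrite | github.com/teuodor/univeristy | programming fundamentals/btvale/dealuivale.py | bktRec
-- ===== SOURCE A (Python) =====
-- def solutionFound(l,nr):
--     x=[]
--     for i in l:
--         x.append(nr[i])
--     return x
--
-- def solution(l,nr):
--     if len(l) == len(nr):
--         return True
--     return False
--
-- def consistent(l,nr):
--     if len(l)>len(nr):
--         return False
--
--     for i in range(0,len(l)-1):
--         if l[-1]==l[i]:
--             return False
--
--     i=1
--     while i<len(l) and nr[l[i-1]]>nr[l[i]]:
--         i+=1
--
--     if i==len(l):
--         return True
--
--     while i<len(l) and nr[l[i-1]]<nr[l[i]]: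
--         i+=1
--
--     if i == len(l):
--         return True
--
--     return False
--
-- def bktRec(nr):
--     l=[]
--     x=[]
--     def bkt(l,nr,x):
--         l.append(-1)
--         for i in range(0,len(nr)):
--             l[-1]=i
--             if consistent(l,nr):
--                 if solution(l,nr):
--                     x.append(solutionFound(l,nr))
--                 else:
--                     bkt(l[:],nr,x)
--         return x
--     a=bkt(l,nr,x)
--     return x
-- ===== SOURCE B (Python) =====
-- def _step(last, desc, v):
--     # incremental valley check: returns new desc flag, or None if v cannot extend
--     if last is None:
--         return True
--     if v > last:
--         return False
--     if desc and v < last: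
--         return True
--     return None
--
-- def bktRec(nr):
--     n = len(nr)
--     res = []
--     def extend(vals, used, last, desc):
--         for i in range(n):
--             if i not in used:
--                 v = nr[i]
--                 nd = _step(last, desc, v)
--                 if nd is not None:
--                     nv = vals + [v]
--                     if len(nv) < n:
--                         extend(nv, used | {i}, v, nd)
--                     else:
--                         res.append(nv)
--     extend([], set(), None, False)
--     return res
-- ===== Notes on version B (the rewrite author's own statement) =====
-- stated objective: alternative
-- what changed: A re-validates the whole prefix at every candidate (duplicate scan plus two while-loop passes over the chosen values); B instead carries a used-set, the last chosen value and a descending-phase flag, deciding each candidate from that constant-size state without rescanning the prefix.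
import Mathlib
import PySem

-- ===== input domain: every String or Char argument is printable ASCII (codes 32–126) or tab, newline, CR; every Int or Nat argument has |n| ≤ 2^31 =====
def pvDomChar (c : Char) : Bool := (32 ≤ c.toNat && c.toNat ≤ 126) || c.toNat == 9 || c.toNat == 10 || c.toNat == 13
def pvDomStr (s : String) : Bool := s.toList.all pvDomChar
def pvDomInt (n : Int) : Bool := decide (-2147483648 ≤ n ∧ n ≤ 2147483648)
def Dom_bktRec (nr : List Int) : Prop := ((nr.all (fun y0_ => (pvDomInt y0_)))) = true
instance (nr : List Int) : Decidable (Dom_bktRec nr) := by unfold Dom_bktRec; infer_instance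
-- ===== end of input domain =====

-- B replaces A's full-prefix revalidation at every candidate (duplicate scan plus two
-- while-loop passes) by an incremental check carrying a used-set, the last chosen value
-- and a descending-phase flag.


-- ===== PORT A =====
-- x = [nr[i] for i in l] built by append; exact since every i in l is a valid index here
def solutionFoundA (l nr : List Int) : List Int :=
  l.map (fun j => PySem.List.pyGetD nr j 0)

-- nr[l[j]] as consistent reads it (indices produced by bkt are always in range)
def pvAt (nr l : List Int) (j : Nat) : Int :=
  PySem.List.pyGetD nr (PySem.List.pyGetD l (j : Int) 0) 0

-- one 'while i < len and cmp(f(i-1), f(i)): i += 1' loop (used twice by consistent);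
-- the extra fuel argument only makes the recursion structural: callers pass fuel ≥ len - i,
-- so the guard never fires and the loop runs exactly as Python's
def pvWhile (cmp : Int → Int → Bool) (f : Nat → Int) : Nat → Nat → Nat → Nat
  | 0, _, i => i
  | fuel + 1, len, i =>
    if i < len ∧ cmp (f (i - 1)) (f i) = true then pvWhile cmp f fuel len (i + 1) else i

-- the two while loops + final ifs of consistent, over f j = nr[l[j]]
def valleyScan (f : Nat → Int) (len : Nat) : Bool :=
  let i1 := pvWhile (fun a b => decide (a > b)) f len len 1
  if i1 = len then true
  else if pvWhile (fun a b => decide (a < b)) f len len i1 = len then true else false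

def consistentA (l nr : List Int) : Bool :=
  if l.length > nr.length then false
  else if (List.range (l.length - 1)).any
      (fun j => PySem.List.pyGetD l (-1) 0 == PySem.List.pyGetD l (j : Int) 0) then false
  else valleyScan (pvAt nr l) l.length

-- bkt's body: for i in range(len(nr)) with l[-1] = i, i.e. l ++ [i]; fuel only makes the
-- nested recursion structural — bktRec passes (n+2)^2 fuel, more than any call path consumes
def bktLoopA (nr : List Int) : Nat → List Int → List (List Int) → Nat → List (List Int)
  | 0, _, x, _ => x
  | fuel + 1, l, x, i =>
    if i < nr.length then
      if consistentA (l ++ [(i : Int)]) nr = true then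
        if (l ++ [(i : Int)]).length = nr.length then
          bktLoopA nr fuel l (x ++ [solutionFoundA (l ++ [(i : Int)]) nr]) (i + 1)
        else
          bktLoopA nr fuel l (bktLoopA nr fuel (l ++ [(i : Int)]) x 0) (i + 1)
      else bktLoopA nr fuel l x (i + 1)
    else x

def bktRec (nr : List Int) : List (List Int) :=
  bktLoopA nr ((nr.length + 2) * (nr.length + 2)) [] [] 0

-- ===== PORT B =====
-- _step(last, desc, v): new desc flag, or none when v cannot extend the valley
def stepB (last : Option Int) (desc : Bool) (v : Int) : Option Bool :=
  match last with
  | none => some true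
  | some lv => if v > lv then some false else if desc && v < lv then some true else none

-- extend's for-loop; the fuel argument only makes the recursion structural, as in bktLoopA
def extLoopB (nr : List Int) : Nat → List Int → PySem.Set Int → Option Int → Bool →
    List (List Int) → Nat → List (List Int)
  | 0, _, _, _, _, res, _ => res
  | fuel + 1, vals, used, last, desc, res, i =>
    if i < nr.length then
      if PySem.Set.contains used (i : Int) then extLoopB nr fuel vals used last desc res (i + 1)
      else
        match stepB last desc (PySem.List.pyGetD nr (i : Int) 0) with
        | none => extLoopB nr fuel vals used last desc res (i + 1)
        | some nd =>
          if (vals ++ [PySem.List.pyGetD nr (i : Int) 0]).length < nr.length then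
            extLoopB nr fuel vals used last desc
              (extLoopB nr fuel (vals ++ [PySem.List.pyGetD nr (i : Int) 0])
                (PySem.Set.add used (i : Int)) (some (PySem.List.pyGetD nr (i : Int) 0)) nd res 0)
              (i + 1)
          else
            extLoopB nr fuel vals used last desc
              (res ++ [vals ++ [PySem.List.pyGetD nr (i : Int) 0]]) (i + 1)
    else res

def bktRec_alt (nr : List Int) : List (List Int) :=
  extLoopB nr ((nr.length + 2) * (nr.length + 2)) [] PySem.Set.empty none false [] 0

-- ===== PRECONDITION & SPEC =====
def Spec_bktRec (nr : List Int) (out : List (List Int)) : Prop := out = bktRec_alt nr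
instance (nr : List Int) (out : List (List Int)) : Decidable (Spec_bktRec nr out) := by unfold Spec_bktRec; infer_instance

-- ===== CLAIM (what is proved, stated in full; the proofs are below) =====
def Claim_equal_bktRec : Prop := ∀ (nr : List Int), Dom_bktRec nr → Spec_bktRec nr (bktRec nr)

-- ===== LEMMAS AND PROOFS =====

-- B's incremental state, replayed as a fold over the value sequence
def stepS (s : Option (Int × Bool)) (v : Int) : Option (Int × Bool) :=
  s.bind fun p => (stepB (some p.1) p.2 v).map fun nd => (v, nd)

def stateOf : List Int → Option (Int × Bool)
  | [] => none
  | w :: ws => ws.foldl stepS (some (w, true))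

theorem stateOf_append (vals : List Int) (v : Int) (h : vals ≠ []) :
    stateOf (vals ++ [v]) = stepS (stateOf vals) v := by
  cases vals with
  | nil => exact absurd rfl h
  | cons w ws => simp [stateOf, List.foldl_append]

def cmpGt : Int → Int → Bool := fun a b => decide (a > b)
def cmpLt : Int → Int → Bool := fun a b => decide (a < b)

theorem pvWhile_stop {cmp : Int → Int → Bool} {f : Nat → Int} {len i : Nat} (k : Nat)
    (h : ¬(i < len ∧ cmp (f (i - 1)) (f i) = true)) : pvWhile cmp f k len i = i := by
  cases k with
  | zero => rfl
  | succ k => simp only [pvWhile]; rw [if_neg h]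

theorem pvWhile_go {cmp : Int → Int → Bool} {f : Nat → Int} {k len i : Nat}
    (h : i < len ∧ cmp (f (i - 1)) (f i) = true) :
    pvWhile cmp f (k + 1) len i = pvWhile cmp f k len (i + 1) := by
  simp only [pvWhile]; rw [if_pos h]

theorem pvWhile_len (cmp : Int → Int → Bool) (f : Nat → Int) (k len : Nat) :
    pvWhile cmp f k len len = len :=
  pvWhile_stop k (fun hc => absurd hc.1 (by omega))

theorem pvWhile_bounds (cmp : Int → Int → Bool) (f : Nat → Int) (len : Nat) :
    ∀ k i, i ≤ len → i ≤ pvWhile cmp f k len i ∧ pvWhile cmp f k len i ≤ len := by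
  intro k
  induction k with
  | zero => intro i h; exact ⟨le_rfl, h⟩
  | succ k ih =>
    intro i h
    by_cases hc : i < len ∧ cmp (f (i - 1)) (f i) = true
    · rw [pvWhile_go hc]
      have := ih (i + 1) (by omega)
      omega
    · rw [pvWhile_stop _ hc]; omega

theorem pvWhile_congr (cmp : Int → Int → Bool) (f g : Nat → Int) (len : Nat)
    (hfg : ∀ j, j < len → f j = g j) :
    ∀ k i, pvWhile cmp f k len i = pvWhile cmp g k len i := by
  intro k
  induction k with
  | zero => intro i; rfl
  | succ k ih =>
    intro i
    by_cases hi : i < len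
    · have e1 : f (i - 1) = g (i - 1) := hfg _ (by omega)
      have e2 : f i = g i := hfg _ hi
      by_cases hc : cmp (g (i - 1)) (g i) = true
      · rw [pvWhile_go ⟨hi, by rw [e1, e2]; exact hc⟩, pvWhile_go ⟨hi, hc⟩, ih]
      · rw [pvWhile_stop _ (fun h => hc (by rw [← e1, ← e2]; exact h.2)),
            pvWhile_stop _ (fun h => hc h.2)]
    · rw [pvWhile_stop _ (fun hc => absurd hc.1 hi),
          pvWhile_stop _ (fun hc => absurd hc.1 hi)]

theorem pvWhile_ext_len (cmp : Int → Int → Bool) (f' : Nat → Int) (k len : Nat) :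
    pvWhile cmp f' (k + 1) (len + 1) len =
      if cmp (f' (len - 1)) (f' len) = true then len + 1 else len := by
  by_cases hc : cmp (f' (len - 1)) (f' len) = true
  · rw [pvWhile_go ⟨by omega, hc⟩, pvWhile_len, if_pos hc]
  · rw [pvWhile_stop _ (fun h => hc h.2), if_neg hc]

theorem pvWhile_ext (cmp : Int → Int → Bool) (f f' : Nat → Int) (len : Nat)
    (hag : ∀ j, j < len → f' j = f j) :
    ∀ k i, len - i ≤ k → 1 ≤ i → i ≤ len →
      pvWhile cmp f' (k + 1) (len + 1) i =
        if pvWhile cmp f k len i = len then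
          (if cmp (f' (len - 1)) (f' len) = true then len + 1 else len)
        else pvWhile cmp f k len i := by
  intro k
  induction k with
  | zero =>
    intro i h1 h2 h3
    have hi : i = len := by omega
    rw [hi, show pvWhile cmp f 0 len len = len from rfl, if_pos rfl, pvWhile_ext_len]
  | succ k ih =>
    intro i h1 h2 h3
    by_cases hi : i < len
    · have e1 : f' (i - 1) = f (i - 1) := hag _ (by omega)
      have e2 : f' i = f i := hag _ hi
      by_cases hc : cmp (f (i - 1)) (f i) = true
      · rw [pvWhile_go (k := k + 1) ⟨by omega, by rw [e1, e2]; exact hc⟩,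
            pvWhile_go ⟨hi, hc⟩]
        exact ih (i + 1) (by omega) (by omega) (by omega)
      · rw [pvWhile_stop _ (fun h => hc (by rw [← e1, ← e2]; exact h.2)),
            pvWhile_stop _ (fun h => hc h.2), if_neg (by omega)]
    · have hi' : i = len := by omega
      subst hi'
      rw [pvWhile_len, if_pos rfl, pvWhile_ext_len]

def scanG (ws : List Int) : Nat :=
  pvWhile cmpGt (fun j => ws.getD j 0) ws.length ws.length 1
def scanL (ws : List Int) (i : Nat) : Nat :=
  pvWhile cmpLt (fun j => ws.getD j 0) ws.length ws.length i

theorem valleyScan_eq (f : Nat → Int) (len : Nat) :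
    valleyScan f len =
      if pvWhile cmpGt f len len 1 = len then true
      else if pvWhile cmpLt f len len (pvWhile cmpGt f len len 1) = len then true
      else false := rfl

theorem valleyScan_scan (ws : List Int) :
    valleyScan (fun j => ws.getD j 0) ws.length =
      if scanG ws = ws.length then true
      else if scanL ws (scanG ws) = ws.length then true else false := rfl

-- the heart: A's whole-prefix rescan agrees with B's carried (last, desc) state
theorem valley_state : ∀ ws : List Int, ws ≠ [] →
    (valleyScan (fun j => ws.getD j 0) ws.length = (stateOf ws).isSome)
    ∧ (∀ lv d, stateOf ws = some (lv, d) →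
        lv = ws.getD (ws.length - 1) 0
        ∧ (d = true ↔ scanG ws = ws.length)
        ∧ (d = false → scanL ws (scanG ws) = ws.length))
    ∧ (stateOf ws = none → scanG ws < ws.length ∧ scanL ws (scanG ws) < ws.length) := by
  intro ws0
  induction ws0 using List.reverseRecOn with
  | nil => intro h; exact absurd rfl h
  | append_singleton ws v ih =>
    intro _
    by_cases hws : ws = []
    · subst hws
      refine ⟨?_, ?_, ?_⟩
      · simp [valleyScan_eq, pvWhile_len, stateOf]
      · intro lv d hst
        simp [stateOf] at hst
        obtain ⟨h1, h2⟩ := hst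
        subst h1; subst h2
        refine ⟨by simp, by simp [scanG, pvWhile_len], fun h => by simp at h⟩
      · intro h; simp [stateOf] at h
    · have hlen1 : 0 < ws.length := List.length_pos_of_ne_nil hws
      obtain ⟨ih1, ih2, ih3⟩ := ih hws
      have hag : ∀ j, j < ws.length → (ws ++ [v]).getD j 0 = ws.getD j 0 :=
        fun j hj => List.getD_append ws [v] 0 j hj
      have hlast : (ws ++ [v]).getD ws.length 0 = v := by
        rw [List.getD_append_right] <;> simp
      have hlstm1 : (ws ++ [v]).getD (ws.length - 1) 0 = ws.getD (ws.length - 1) 0 :=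
        hag _ (by omega)
      have hG : scanG (ws ++ [v]) =
          if scanG ws = ws.length then
            (if cmpGt ((ws ++ [v]).getD (ws.length - 1) 0) ((ws ++ [v]).getD ws.length 0) = true
             then ws.length + 1 else ws.length)
          else scanG ws := by
        simp only [scanG, List.length_append, List.length_singleton]
        exact pvWhile_ext cmpGt _ _ ws.length hag ws.length 1 (by omega) le_rfl hlen1
      have hLx : ∀ i, 1 ≤ i → i ≤ ws.length → scanL (ws ++ [v]) i =
          if scanL ws i = ws.length then
            (if cmpLt ((ws ++ [v]).getD (ws.length - 1) 0) ((ws ++ [v]).getD ws.length 0) = true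
             then ws.length + 1 else ws.length)
          else scanL ws i := by
        intro i h1 h2
        simp only [scanL, List.length_append, List.length_singleton]
        exact pvWhile_ext cmpLt _ _ ws.length hag ws.length i (by omega) h1 h2
      have hGb : 1 ≤ scanG ws ∧ scanG ws ≤ ws.length := by
        simpa [scanG] using pvWhile_bounds cmpGt (fun j => ws.getD j 0) ws.length ws.length 1
          hlen1
      have hsa : stateOf (ws ++ [v]) = stepS (stateOf ws) v := stateOf_append ws v hws
      rcases hst : stateOf ws with _ | ⟨lv, d⟩
      · -- prefix already rejected: everything stays rejected
        obtain ⟨hg, hl⟩ := ih3 hst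
        have hG' : scanG (ws ++ [v]) = scanG ws := by rw [hG, if_neg (by omega)]
        have hL' : scanL (ws ++ [v]) (scanG ws) = scanL ws (scanG ws) := by
          rw [hLx _ hGb.1 hGb.2, if_neg (by omega)]
        have hst' : stateOf (ws ++ [v]) = none := by rw [hsa, hst]; rfl
        refine ⟨?_, ?_, ?_⟩
        · rw [valleyScan_scan, hG', hL', hst']
          simp only [List.length_append, List.length_singleton]
          rw [if_neg (by omega), if_neg (by omega)]
          rfl
        · intro lv' d' h; rw [hst'] at h; cases h
        · intro _
          rw [hG', hL']
          simp only [List.length_append, List.length_singleton]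
          omega
      · obtain ⟨hlv, hdt, hdf⟩ := ih2 lv d hst
        have hcg : cmpGt ((ws ++ [v]).getD (ws.length - 1) 0) ((ws ++ [v]).getD ws.length 0)
            = decide (lv > v) := by rw [hlstm1, hlast, ← hlv]; rfl
        have hcl : cmpLt ((ws ++ [v]).getD (ws.length - 1) 0) ((ws ++ [v]).getD ws.length 0)
            = decide (lv < v) := by rw [hlstm1, hlast, ← hlv]; rfl
        cases d with
        | true =>
          have hsg : scanG ws = ws.length := hdt.mp rfl
          rcases lt_trichotomy v lv with hvl | hvl | hvl
          · -- still strictly decreasing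
            have hG' : scanG (ws ++ [v]) = ws.length + 1 := by
              rw [hG, if_pos hsg, hcg, if_pos (by simpa using hvl)]
            have hst' : stateOf (ws ++ [v]) = some (v, true) := by
              rw [hsa, hst]
              simp only [stepS, Option.bind_some, stepB]
              rw [if_neg (by omega), if_pos (by simp [hvl])]
              rfl
            refine ⟨?_, ?_, ?_⟩
            · rw [valleyScan_scan, hG', hst']
              simp only [List.length_append, List.length_singleton, if_pos]
              rfl
            · intro lv' d' h
              rw [hst'] at h
              injection h with h'
              injection h' with h1 h2
              subst h1; subst h2
              refine ⟨?_, by simp [hG'], fun h => by cases h⟩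
              simp only [List.length_append, List.length_singleton, Nat.add_sub_cancel]
              rw [hlast]
            · intro h; rw [hst'] at h; cases h
          · -- equal values: rejected
            have hG' : scanG (ws ++ [v]) = ws.length := by
              rw [hG, if_pos hsg, hcg, if_neg (by simp [hvl])]
            have hL' : scanL (ws ++ [v]) ws.length = ws.length := by
              rw [hLx ws.length hlen1 le_rfl,
                  if_pos (by simp [scanL, pvWhile_len]), hcl, if_neg (by simp [hvl])]
            have hst' : stateOf (ws ++ [v]) = none := by
              rw [hsa, hst]
              simp only [stepS, Option.bind_some, stepB]
              rw [if_neg (by omega), if_neg (by simp; omega)]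
              rfl
            refine ⟨?_, ?_, ?_⟩
            · rw [valleyScan_scan, hG', hL', hst']
              simp only [List.length_append, List.length_singleton]
              rw [if_neg (by omega), if_neg (by omega)]
              rfl
            · intro lv' d' h; rw [hst'] at h; cases h
            · intro _
              rw [hG', hL']
              simp only [List.length_append, List.length_singleton]
              omega
          · -- first ascent
            have hG' : scanG (ws ++ [v]) = ws.length := by
              rw [hG, if_pos hsg, hcg, if_neg (by simp; omega)]
            have hL' : scanL (ws ++ [v]) ws.length = ws.length + 1 := by
              rw [hLx ws.length hlen1 le_rfl,
                  if_pos (by simp [scanL, pvWhile_len]), hcl, if_pos (by simpa using hvl)]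
            have hst' : stateOf (ws ++ [v]) = some (v, false) := by
              rw [hsa, hst]
              simp only [stepS, Option.bind_some, stepB]
              rw [if_pos (by omega)]
              rfl
            refine ⟨?_, ?_, ?_⟩
            · rw [valleyScan_scan, hG', hL', hst']
              simp only [List.length_append, List.length_singleton]
              rw [if_neg (by omega)]
              simp
            · intro lv' d' h
              rw [hst'] at h
              injection h with h'
              injection h' with h1 h2
              subst h1; subst h2
              refine ⟨?_, ?_, ?_⟩
              · simp only [List.length_append, List.length_singleton, Nat.add_sub_cancel]
                rw [hlast]
              · simp only [List.length_append, List.length_singleton]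
                constructor
                · intro h; cases h
                · intro h; rw [hG'] at h; omega
              · intro _
                rw [hG', hL']
                simp [List.length_append]
            · intro h; rw [hst'] at h; cases h
        | false =>
          have hsg : scanG ws ≠ ws.length := fun h => by simpa using hdt.mpr h
          have hsl : scanL ws (scanG ws) = ws.length := hdf rfl
          have hG' : scanG (ws ++ [v]) = scanG ws := by rw [hG, if_neg hsg]
          have hL' : scanL (ws ++ [v]) (scanG ws) =
              if decide (lv < v) = true then ws.length + 1 else ws.length := by
            rw [hLx _ hGb.1 hGb.2, if_pos hsl, hcl]
          by_cases hvl : lv < v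
          · -- ascending continues
            have hst' : stateOf (ws ++ [v]) = some (v, false) := by
              rw [hsa, hst]
              simp only [stepS, Option.bind_some, stepB]
              rw [if_pos (by omega)]
              rfl
            refine ⟨?_, ?_, ?_⟩
            · rw [valleyScan_scan, hG', hL', hst']
              simp only [List.length_append, List.length_singleton]
              rw [if_neg (by omega), if_pos (by simpa using hvl)]
              simp
            · intro lv' d' h
              rw [hst'] at h
              injection h with h'
              injection h' with h1 h2
              subst h1; subst h2
              refine ⟨?_, ?_, ?_⟩
              · simp only [List.length_append, List.length_singleton, Nat.add_sub_cancel]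
                rw [hlast]
              · simp only [List.length_append, List.length_singleton]
                constructor
                · intro h; cases h
                · intro h; rw [hG'] at h; omega
              · intro _
                rw [hG', hL', if_pos (by simpa using hvl)]
                simp [List.length_append]
            · intro h; rw [hst'] at h; cases h
          · -- cannot extend
            have hst' : stateOf (ws ++ [v]) = none := by
              rw [hsa, hst]
              simp only [stepS, Option.bind_some, stepB]
              rw [if_neg (by omega), if_neg (by simp)]
              rfl
            refine ⟨?_, ?_, ?_⟩
            · rw [valleyScan_scan, hG', hL', hst']
              simp only [List.length_append, List.length_singleton]
              rw [if_neg (by omega), if_neg (by simpa using hvl)]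
              simp
            · intro lv' d' h; rw [hst'] at h; cases h
            · intro _
              rw [hG', hL', if_neg (by simpa using hvl)]
              simp only [List.length_append, List.length_singleton]
              omega

theorem valleyScan_congr (f g : Nat → Int) (len : Nat) (h : ∀ j, j < len → f j = g j) :
    valleyScan f len = valleyScan g len := by
  rw [valleyScan_eq, valleyScan_eq, pvWhile_congr cmpGt f g len h len 1,
      pvWhile_congr cmpLt f g len h len _]

theorem range_any_contains (l : List Int) (a : Int) :
    ((List.range l.length).any fun j => a == l.getD j 0) = decide (a ∈ l) := by
  induction l using List.reverseRecOn with
  | nil => simp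
  | append_singleton l b ih =>
    simp only [List.length_append, List.length_singleton, List.range_succ, List.any_append]
    rw [PySem.List.any_congr_mem
      (fun j hj => by rw [List.getD_append l [b] 0 j (List.mem_range.mp hj)]), ih]
    simp
    by_cases hab : a = b <;> simp [hab]

theorem pvAt_eq_vals (nr l : List Int) (j : Nat) (hj : j < l.length) :
    pvAt nr l j = (solutionFoundA l nr).getD j 0 := by
  simp [pvAt, solutionFoundA, PySem.List.pyGetD_natCast, List.getD_eq_getElem?_getD,
    List.getElem?_map, List.getElem?_eq_getElem hj]

theorem consistentA_append (nr l : List Int) (i : Int) (hlen : l.length + 1 ≤ nr.length) :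
    consistentA (l ++ [i]) nr =
      (!(decide (i ∈ l)) && (stateOf (solutionFoundA (l ++ [i]) nr)).isSome) := by
  unfold consistentA
  rw [if_neg (by simp; omega)]
  have hdup : ((List.range ((l ++ [i]).length - 1)).any
      (fun j => PySem.List.pyGetD (l ++ [i]) (-1) 0 == PySem.List.pyGetD (l ++ [i]) (j : Int) 0))
      = decide (i ∈ l) := by
    simp only [List.length_append, List.length_singleton, Nat.add_sub_cancel,
      PySem.List.pyGetD_neg_one_append_singleton, PySem.List.pyGetD_natCast]
    rw [PySem.List.any_congr_mem
      (fun j hj => by rw [List.getD_append l [i] 0 j (List.mem_range.mp hj)])]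
    exact range_any_contains l i
  by_cases hmem : i ∈ l
  · rw [if_pos (by rw [hdup]; simp [hmem])]
    simp [hmem]
  · rw [if_neg (by rw [hdup]; simp [hmem])]
    have hne : l ++ [i] ≠ [] := by simp
    have hlen2 : (solutionFoundA (l ++ [i]) nr).length = (l ++ [i]).length := by
      simp [solutionFoundA]
    rw [valleyScan_congr _ _ _ (fun j hj => pvAt_eq_vals nr (l ++ [i]) j hj)]
    rw [show (l ++ [i]).length = (solutionFoundA (l ++ [i]) nr).length from hlen2.symm]
    rw [(valley_state (solutionFoundA (l ++ [i]) nr) (by simp [solutionFoundA])).1]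
    simp [hmem]

theorem loop_eq (nr : List Int) : ∀ fuel : Nat, ∀ (l : List Int) (last : Option Int) (desc : Bool),
    ((l = [] ∧ last = none) ∨
      (l ≠ [] ∧ ∃ lv, last = some lv ∧ stateOf (solutionFoundA l nr) = some (lv, desc))) →
    (l.length < nr.length ∨ l = []) →
    ∀ (res : List (List Int)) (i : Nat),
      bktLoopA nr fuel l res i = extLoopB nr fuel (solutionFoundA l nr) l last desc res i := by
  intro fuel
  induction fuel with
  | zero => intro l last desc _ _ res i; rfl
  | succ fuel ih =>
    intro l last desc hinv hlt res i
    by_cases hi : i < nr.length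
    · have hlen : l.length + 1 ≤ nr.length := by
        rcases hlt with h | h
        · omega
        · subst h; simp only [List.length_nil]; omega
      have hvals : solutionFoundA (l ++ [(i : Int)]) nr
          = solutionFoundA l nr ++ [PySem.List.pyGetD nr (i : Int) 0] := by
        simp [solutionFoundA]
      have hB : stateOf (solutionFoundA l nr ++ [PySem.List.pyGetD nr (i : Int) 0])
          = (stepB last desc (PySem.List.pyGetD nr (i : Int) 0)).map
              (fun nd => (PySem.List.pyGetD nr (i : Int) 0, nd)) := by
        rcases hinv with ⟨hl0, hlast0⟩ | ⟨hl0, lv, hlast0, hstate⟩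
        · subst hl0; subst hlast0
          simp [solutionFoundA, stateOf, stepB]
        · subst hlast0
          rw [stateOf_append _ _ (by simpa [solutionFoundA] using hl0), hstate]
          rfl
      have hca : consistentA (l ++ [(i : Int)]) nr =
          (!(decide ((i : Int) ∈ l)) &&
            (stepB last desc (PySem.List.pyGetD nr (i : Int) 0)).isSome) := by
        rw [consistentA_append nr l _ hlen, hvals, hB, Option.isSome_map]
      have hcont : PySem.Set.contains l (i : Int) = decide ((i : Int) ∈ l) := by
        simp [PySem.Set.contains_eq_listContains, List.contains_eq_mem]
      simp only [bktLoopA, extLoopB]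
      rw [if_pos hi, if_pos hi, hcont]
      by_cases hmem : (i : Int) ∈ l
      · have hcf : consistentA (l ++ [(i : Int)]) nr = false := by
          rw [hca]; simp [hmem]
        have hcd : decide ((i : Int) ∈ l) = true := by simp [hmem]
        rw [hcf, hcd, if_neg (by simp), if_pos rfl]
        exact ih l last desc hinv hlt res (i + 1)
      · have hcd : ¬(decide ((i : Int) ∈ l) = true) := by simp [hmem]
        rw [if_neg hcd]
        have hlv : (solutionFoundA l nr ++ [PySem.List.pyGetD nr (i : Int) 0]).length
            = l.length + 1 := by simp [solutionFoundA]
        cases hnd : stepB last desc (PySem.List.pyGetD nr (i : Int) 0) with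
        | none =>
          have hcf : consistentA (l ++ [(i : Int)]) nr = false := by
            rw [hca, hnd]; simp
          simp only [hcf, Bool.false_eq_true, if_false]
          exact ih l last desc hinv hlt res (i + 1)
        | some nd =>
          have hct : consistentA (l ++ [(i : Int)]) nr = true := by
            rw [hca, hnd]; simp [hmem]
          simp only [hct, if_true]
          by_cases hfull : l.length + 1 = nr.length
          · rw [if_pos (show (l ++ [(i : Int)]).length = nr.length by simp; omega),
                if_neg (show ¬(solutionFoundA l nr ++ [PySem.List.pyGetD nr (i : Int) 0]).length
                  < nr.length by rw [hlv]; omega)]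
            rw [hvals]
            exact ih l last desc hinv hlt _ (i + 1)
          · rw [if_neg (show ¬(l ++ [(i : Int)]).length = nr.length by simp; omega),
                if_pos (show (solutionFoundA l nr ++ [PySem.List.pyGetD nr (i : Int) 0]).length
                  < nr.length by rw [hlv]; omega)]
            have hadd : PySem.Set.add l (i : Int) = l ++ [(i : Int)] := by
              simp [PySem.Set.add, PySem.Set.contains_eq_listContains,
                List.contains_eq_mem, hmem]
            have hdeep : bktLoopA nr fuel (l ++ [(i : Int)]) res 0 =
                extLoopB nr fuel (solutionFoundA l nr ++ [PySem.List.pyGetD nr (i : Int) 0])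
                  (l ++ [(i : Int)]) (some (PySem.List.pyGetD nr (i : Int) 0)) nd res 0 := by
              have := ih (l ++ [(i : Int)])
                (some (PySem.List.pyGetD nr (i : Int) 0)) nd
                (Or.inr ⟨by simp, PySem.List.pyGetD nr (i : Int) 0, rfl,
                  by rw [hvals, hB, hnd]; rfl⟩)
                (Or.inl (by simp; omega))
                res 0
              rw [this, hvals]
            rw [hadd, ← hdeep]
            exact ih l last desc hinv hlt _ (i + 1)
    · simp only [bktLoopA, extLoopB]
      rw [if_neg hi, if_neg hi]

-- ===== VERDICT (by name: the statement is the Claim_ definition above) =====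
theorem bktRec_spec : Claim_equal_bktRec := by
  intro nr _
  show bktRec nr = bktRec_alt nr
  exact loop_eq nr ((nr.length + 2) * (nr.length + 2)) [] none false
    (Or.inl ⟨rfl, rfl⟩) (Or.inr rfl) [] 0
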